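-- pv_equiv track=rewrite | github.com/binchen15/leet-python | arrays_matrices/prob1365.py | smallerNumbersThanCurrent
-- ===== SOURCE A (Python) =====
-- def smallerNumbersThanCurrent(nums):
--     """
--     :type nums: List[int]
--     :rtype: List[int]
--     """
--     histo = [0] * 101
--     for n in nums:
--         histo[n] += 1
--     csum = 0 # cumulative sum
--     for i in range(101):
--         prev = histo[i]
--         histo[i] = csum
--         csum += prev
--
--     return [ histo[n] for n in nums]
-- ===== SOURCE B (Python) =====
-- def smallerNumbersThanCurrent(nums):
--     """
--     :type nums: List[int]
--     :rtype: List[int]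
--     """
--     return [sum(x < n for x in nums) for n in nums]
-- ===== Notes on version B (the rewrite author's own statement) =====
-- stated objective: simpler
-- what changed: Replaces the fixed-size-101 histogram with in-place prefix-sum pass and table lookup by a direct one-line pairwise count: each output element is sum(x < n for x in nums).
-- outside the precondition, e.g. on smallerNumbersThanCurrent([-1, 5]): A returns [1, 0], B returns [0, 1]; on smallerNumbersThanCurrent([101]): A raises IndexError, B returns [0]
import Mathlib
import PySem

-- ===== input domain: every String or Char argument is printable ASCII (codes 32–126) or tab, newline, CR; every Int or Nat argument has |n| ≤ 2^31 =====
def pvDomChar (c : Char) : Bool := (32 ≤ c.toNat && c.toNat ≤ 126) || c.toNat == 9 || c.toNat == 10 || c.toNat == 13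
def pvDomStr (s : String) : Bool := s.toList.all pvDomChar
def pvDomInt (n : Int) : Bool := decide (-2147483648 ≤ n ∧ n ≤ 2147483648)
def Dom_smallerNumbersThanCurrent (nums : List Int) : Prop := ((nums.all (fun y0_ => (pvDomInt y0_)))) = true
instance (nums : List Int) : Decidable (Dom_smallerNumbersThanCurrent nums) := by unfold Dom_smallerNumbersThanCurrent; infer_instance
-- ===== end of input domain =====

-- B replaces A's histogram + in-place prefix-sum + table lookup by a direct pairwise
-- count (each output element is the number of elements strictly smaller); simpler, not faster.

-- ===== PORT A =====
-- body of A's histogram loop: histo[n] += 1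
def pvStepH (h : List Int) (n : Int) : List Int :=
  PySem.List.pySetD h n (PySem.List.pyGetD h n 0 + 1)
-- body of A's prefix-sum loop: prev = histo[i]; histo[i] = csum; csum += prev
def pvStepP (st : List Int × Int) (i : Int) : List Int × Int :=
  let prev := PySem.List.pyGetD st.1 i 0
  (PySem.List.pySetD st.1 i st.2, st.2 + prev)

def smallerNumbersThanCurrent (nums : List Int) : List Int :=
  let histo0 : List Int := List.replicate 101 0
  let histo1 := nums.foldl pvStepH histo0
  let st := (PySem.List.pyRange 0 101 1).foldl pvStepP (histo1, 0)
  nums.map (fun n => PySem.List.pyGetD st.1 n 0)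

-- ===== PORT B =====
def smallerNumbersThanCurrent_alt (nums : List Int) : List Int :=
  nums.map (fun n => (nums.map (fun x => if x < n then (1 : Int) else 0)).sum)

-- ===== PRECONDITION & SPEC =====
-- Pre_ restricts to the problem's natural domain 0 ≤ n ≤ 100 (the size of A's fixed table):
-- outside it A either raises IndexError (n > 100 or n < -101) or, for -101 ≤ n ≤ -1, returns
-- values produced by accidental negative-index wraparound into the length-101 table.
def Pre_smallerNumbersThanCurrent (nums : List Int) : Prop :=
  ∀ n ∈ nums, 0 ≤ n ∧ n ≤ 100
instance (nums : List Int) : Decidable (Pre_smallerNumbersThanCurrent nums) := by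
  unfold Pre_smallerNumbersThanCurrent; infer_instance

def pvWitness_smallerNumbersThanCurrent : List Int := [8, 1, 2, 2, 3]

def Spec_smallerNumbersThanCurrent (nums : List Int) (out : List Int) : Prop :=
  out = smallerNumbersThanCurrent_alt nums
instance (nums : List Int) (out : List Int) : Decidable (Spec_smallerNumbersThanCurrent nums out) := by
  unfold Spec_smallerNumbersThanCurrent; infer_instance

-- ===== CLAIM (what is proved, stated in full; the proofs are below) =====
def Claim_equal_smallerNumbersThanCurrent : Prop :=
  ∀ (nums : List Int), Dom_smallerNumbersThanCurrent nums →
    Pre_smallerNumbersThanCurrent nums →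
    Spec_smallerNumbersThanCurrent nums (smallerNumbersThanCurrent nums)

-- ===== LEMMAS AND PROOFS =====

-- number of elements strictly below v / equal to v, as an Int
def pvCntLt (nums : List Int) (v : Int) : Int := (nums.countP (fun x => decide (x < v)) : Int)
def pvCntEq (nums : List Int) (v : Int) : Int := (nums.countP (fun x => decide (x = v)) : Int)

-- A's histogram after its first loop
def pvH (nums : List Int) : List Int := nums.foldl pvStepH (List.replicate 101 0)
-- A's state after j iterations of its prefix-sum loop
def pvP (nums : List Int) (j : Int) : List Int × Int :=
  (PySem.List.pyRange 0 j 1).foldl pvStepP (pvH nums, 0)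

lemma pvCntLt_zero (nums : List Int) (hpre : ∀ n ∈ nums, 0 ≤ n ∧ n ≤ 100) :
    pvCntLt nums 0 = 0 := by
  unfold pvCntLt
  have : nums.countP (fun x => decide (x < 0)) = 0 := by
    apply List.countP_eq_zero.mpr
    intro x hx
    have := (hpre x hx).1
    simp; omega
  simp [this]

lemma pvCntLt_succ (nums : List Int) (j : Int) :
    pvCntLt nums (j + 1) = pvCntLt nums j + pvCntEq nums j := by
  unfold pvCntLt pvCntEq
  induction nums with
  | nil => simp
  | cons a l ih =>
    simp only [List.countP_cons]
    by_cases h1 : a < j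
    · have h2 : a < j + 1 := by omega
      have h3 : ¬ a = j := by omega
      simp [h2, h3] at *
      omega
    · by_cases h2 : a = j
      · have h3 : a < j + 1 := by omega
        simp [h2] at *
        omega
      · have h3 : ¬ a < j + 1 := by omega
        simp [h2] at *
        omega

-- get-after-set on Int indices
lemma pv_getset (h : List Int) (n i v : Int) (hn0 : 0 ≤ n) (_hnl : n < (h.length : Int))
    (hi0 : 0 ≤ i) (hil : i < (h.length : Int)) :
    PySem.List.pyGetD (PySem.List.pySetD h n v) i 0 =
      if i = n then v else PySem.List.pyGetD h i 0 := by
  rw [PySem.List.pySetD_of_nonneg h v hn0]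
  rw [PySem.List.pyGetD_eq_getElem _ 0 hi0 (by simpa using hil)]
  rw [List.getElem_set]
  by_cases hin : i = n
  · have hnt : n.toNat = i.toNat := by omega
    simp [hin, hnt]
  · have hne : ¬ (n.toNat = i.toNat) := by omega
    rw [if_neg hne, if_neg hin, PySem.List.pyGetD_eq_getElem _ 0 hi0 hil]

lemma pv_replicate_get (i : Int) (hi0 : 0 ≤ i) (hil : i < 101) :
    PySem.List.pyGetD (List.replicate 101 (0 : Int)) i 0 = 0 := by
  rw [show i = ((i.toNat : Nat) : Int) by omega, PySem.List.pyGetD_natCast]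
  rw [List.getD_eq_getElem?_getD]
  rw [List.getElem?_replicate]
  by_cases h : i.toNat < 101 <;> simp [h]

-- histogram loop invariant
lemma pv_hist (l : List Int) :
    ∀ (h : List Int), h.length = 101 → (∀ n ∈ l, 0 ≤ n ∧ n ≤ 100) →
      (l.foldl pvStepH h).length = 101 ∧
      ∀ i : Int, 0 ≤ i → i < 101 →
        PySem.List.pyGetD (l.foldl pvStepH h) i 0 = PySem.List.pyGetD h i 0 + pvCntEq l i := by
  induction l with
  | nil => intro h hlen _; simpa [pvCntEq] using hlen
  | cons a t ih =>
    intro h hlen hpre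
    have ha := hpre a (by simp)
    have hlen' : (pvStepH h a).length = 101 := by
      rw [pvStepH, PySem.List.length_pySetD]; exact hlen
    have hrec := ih (pvStepH h a) hlen' (fun n hn => hpre n (by simp [hn]))
    refine ⟨by simpa using hrec.1, ?_⟩
    intro i hi0 hil
    have := hrec.2 i hi0 hil
    simp only [List.foldl_cons] at *
    rw [this, pvStepH, pv_getset h a i _ ha.1 (by omega) hi0 (by omega)]
    unfold pvCntEq
    simp only [List.countP_cons]
    by_cases hia : i = a
    · simp [hia]; ring
    · have : ¬ (a = i) := fun hh => hia hh.symm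
      simp [hia, this]

lemma pvH_spec (nums : List Int) (hpre : ∀ n ∈ nums, 0 ≤ n ∧ n ≤ 100) :
    (pvH nums).length = 101 ∧
    ∀ i : Int, 0 ≤ i → i < 101 → PySem.List.pyGetD (pvH nums) i 0 = pvCntEq nums i := by
  obtain ⟨h1, h2⟩ := pv_hist nums (List.replicate 101 0) (by simp) hpre
  refine ⟨h1, fun i hi0 hil => ?_⟩
  rw [pvH, h2 i hi0 hil, pv_replicate_get i hi0 hil]
  ring

lemma pvCntLt_eq_sum (nums : List Int) (n : Int) :
    pvCntLt nums n = (nums.map (fun x => if x < n then (1 : Int) else 0)).sum := by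
  rw [show (fun x : Int => if x < n then (1 : Int) else 0)
        = (fun x : Int => if (fun x : Int => decide (x < n)) x = true then (1 : Int) else 0) from by
      funext x; simp]
  rw [PySem.List.sum_map_ite_one_zero]
  rfl

-- prefix-sum loop invariant
lemma pv_prefix (nums : List Int) (hpre : ∀ n ∈ nums, 0 ≤ n ∧ n ≤ 100) (j : Nat) (hj : j ≤ 101) :
    ((pvP nums (j : Int)).1.length = 101) ∧
    ((pvP nums (j : Int)).2 = pvCntLt nums (j : Int)) ∧
    ∀ i : Int, 0 ≤ i → i < 101 →
      PySem.List.pyGetD (pvP nums (j : Int)).1 i 0 =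
        if i < (j : Int) then pvCntLt nums i else pvCntEq nums i := by
  obtain ⟨hH1, hH2⟩ := pvH_spec nums hpre
  induction j with
  | zero =>
    refine ⟨?_, ?_, ?_⟩
    · simpa [pvP] using hH1
    · simpa [pvP] using (pvCntLt_zero nums hpre).symm
    · intro i hi0 hil
      simp only [Nat.cast_zero, pvP, PySem.List.pyRange_one_eq_nil (le_refl (0 : Int)), List.foldl_nil]
      rw [if_neg (by omega)]
      exact hH2 i hi0 hil
  | succ j ihj =>
    obtain ⟨ih1, ih2, ih3⟩ := ihj (by omega)
    have hstep : pvP nums ((j + 1 : Nat) : Int) = pvStepP (pvP nums (j : Int)) (j : Int) := by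
      rw [pvP, pvP, show (((j + 1 : Nat)) : Int) = (j : Int) + 1 by push_cast; ring,
        PySem.List.pyRange_one_succ_right (by omega), List.foldl_append]
      simp
    have hgetj : PySem.List.pyGetD (pvP nums (j : Int)).1 (j : Int) 0 = pvCntEq nums (j : Int) := by
      rw [ih3 (j : Int) (by omega) (by omega), if_neg (by omega)]
    rw [hstep, pvStepP]
    refine ⟨?_, ?_, ?_⟩
    · simpa [PySem.List.length_pySetD] using ih1
    · simp only [hgetj, ih2]
      rw [show (((j + 1 : Nat)) : Int) = (j : Int) + 1 by push_cast; ring, pvCntLt_succ]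
    · intro i hi0 hil
      simp only []
      rw [pv_getset _ (j : Int) i _ (by omega) (by omega) hi0 (by omega)]
      by_cases hij : i = (j : Int)
      · rw [if_pos hij, if_pos (by push_cast; omega), hij, ih2]
      · rw [if_neg hij, ih3 i hi0 hil]
        by_cases hlt : i < (j : Int)
        · rw [if_pos hlt, if_pos (by push_cast; omega)]
        · rw [if_neg hlt, if_neg (by push_cast; omega)]

-- ===== VERDICT (by name: the statement is the Claim_ definition above) =====
theorem smallerNumbersThanCurrent_spec : Claim_equal_smallerNumbersThanCurrent := by
  intro nums _ hpre
  unfold Spec_smallerNumbersThanCurrent smallerNumbersThanCurrent smallerNumbersThanCurrent_alt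
  simp only []
  obtain ⟨_, _, h3⟩ := pv_prefix nums hpre 101 (le_refl _)
  apply List.map_congr_left
  intro n hn
  have hnb := hpre n hn
  have hfold : (PySem.List.pyRange 0 101 1).foldl pvStepP (nums.foldl pvStepH (List.replicate 101 0), 0)
      = pvP nums ((101 : Nat) : Int) := by
    rw [pvP, pvH]; norm_num
  rw [hfold]
  have := h3 n hnb.1 (by omega)
  rw [this, if_pos (by push_cast; omega), pvCntLt_eq_sum]
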